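-- pv_equiv track=rewrite | github.com/MasquedMusketeer/Big-Projects | Income_Analyzer/day_month_module.py | dayMonthEncoder
-- ===== SOURCE A (Python) =====
-- month28 = [2]
--
-- month30 = [4,6,9,11]
--
-- def dayMonthEncoder (daymonth):
--     setStart = daymonth.pop(0)
--     month = daymonth.pop(0)
--     dayCounter = 0
--     fullDay = 0
--     HalfDay = 0
-- #setting how many loops will be made:
--     if month in month28:
--         dayCounter = 28
--     elif month in month30:
--         dayCounter = 30
--     else:
--         dayCounter = 31
-- #loop:
--     while dayCounter > 0:
--         if setStart == 1 or setStart == 2 or setStart == 3: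
--             fullDay += 1
--             setStart += 1
--             dayCounter -= 1
--         elif setStart == 4 or setStart == 5:
--             HalfDay += 1
--             setStart += 1
--             dayCounter -= 1
--         else:
--             dayCounter -= 1
--             setStart += 1
--         if setStart > 7:
--             setStart = 1
-- #day to be recorded for next month calculation:
--     nextMonth = month + 1
--     if nextMonth > 12:
--         nextMonth = 1
--     if nextMonth > 9:
--         nextDayMonth = str(setStart) + str(nextMonth)
--     else:
--         nextDayMonth = str(setStart) + ("0" + str(nextMonth))
--
-- #returning result:
--     result = [fullDay, HalfDay, int(nextDayMonth)]
--     return result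
-- ===== SOURCE B (Python) =====
-- def dayMonthEncoder(daymonth):
--     start = daymonth.pop(0)
--     month = daymonth.pop(0)
--     n = 28 if month == 2 else 30 if month in (4, 6, 9, 11) else 31
--     # weekday of every day of the month, plus the first day of the next month
--     days = [start]
--     w = start
--     for _ in range(n):
--         w = w + 1 if w < 7 else 1
--         days.append(w)
--     fullDay = sum(d in (1, 2, 3) for d in days[:n])
--     HalfDay = sum(d in (4, 5) for d in days[:n])
--     nextMonth = month + 1 if month < 12 else 1
--     return [fullDay, HalfDay, int(f"{days[n]}{nextMonth:02d}")]
-- ===== Notes on version B (the rewrite author's own statement) =====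
-- stated objective: alternative
-- what changed: A classifies, steps and wraps the weekday inside one stateful while-loop with three mutable counters; B first generates the month's weekday sequence (plus the next month's first weekday) with an advance function and then obtains full/half counts declaratively with sum() over the sequence, the next month as month+1 with a single wrap test, and the encoding via f-string zero-padding.
import Mathlib
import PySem

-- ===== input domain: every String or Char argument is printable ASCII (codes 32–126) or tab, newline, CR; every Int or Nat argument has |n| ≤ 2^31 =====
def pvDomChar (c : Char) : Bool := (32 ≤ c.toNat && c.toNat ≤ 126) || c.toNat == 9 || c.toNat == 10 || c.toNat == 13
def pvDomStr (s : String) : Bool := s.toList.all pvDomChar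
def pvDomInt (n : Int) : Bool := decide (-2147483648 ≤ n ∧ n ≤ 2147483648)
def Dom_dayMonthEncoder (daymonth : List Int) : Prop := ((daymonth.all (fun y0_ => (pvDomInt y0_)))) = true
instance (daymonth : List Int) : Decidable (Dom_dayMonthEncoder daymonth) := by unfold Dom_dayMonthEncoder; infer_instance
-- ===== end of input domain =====

-- B separates the work: it generates the month's weekday sequence with an advance function, then
-- counts full/half days declaratively (A interleaves classification, stepping and wrap in one stateful
-- loop); both Pythons pop the two leading elements of daymonth (same mutation); return values proved equal.


-- ===== PORT A =====
-- the while-loop of A: fuel = dayCounter (a literal 28/30/31), state (setStart, fullDay, HalfDay)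
def loopA : Nat → Int → Int → Int → Int × Int × Int
  | 0, s, f, h => (s, f, h)
  | n + 1, s, f, h =>
    if s = 1 ∨ s = 2 ∨ s = 3 then
      loopA n (if s + 1 > 7 then 1 else s + 1) (f + 1) h
    else if s = 4 ∨ s = 5 then
      loopA n (if s + 1 > 7 then 1 else s + 1) f (h + 1)
    else
      loopA n (if s + 1 > 7 then 1 else s + 1) f h

def dayMonthEncoder (daymonth : List Int) : List Int :=
  match daymonth with
  | setStart :: month :: _ =>      -- two pop(0): fewer than two elements raises IndexError (outside Pre_)
    let dayCounter : Nat := if month ∈ ([2] : List Int) then 28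
                            else if month ∈ ([4, 6, 9, 11] : List Int) then 30 else 31
    let t := loopA dayCounter setStart 0 0
    let setStart' := t.1
    let fullDay := t.2.1
    let halfDay := t.2.2
    let nextMonth0 := month + 1
    let nextMonth := if nextMonth0 > 12 then 1 else nextMonth0
    let nd : List Char :=
      if nextMonth > 9 then PySem.Int.toChars setStart' ++ PySem.Int.toChars nextMonth
      else PySem.Int.toChars setStart' ++ ('0' :: PySem.Int.toChars nextMonth)
    match PySem.Int.ofChars? nd with   -- int(nextDayMonth): none = ValueError (outside Pre_)
    | some v => [fullDay, halfDay, v]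
    | none => []
  | _ => []

-- ===== PORT B =====
-- the for-loop of Source B: the n weekdays after w, each obtained from the previous by the advance rule
def buildDays : Nat → Int → List Int
  | 0, _ => []
  | k + 1, w =>
    let w' : Int := if w < 7 then w + 1 else 1
    w' :: buildDays k w'

def dayMonthEncoder_alt (daymonth : List Int) : List Int :=
  match daymonth with
  | [] => []
  | start :: tail =>               -- first pop(0) of Source B
   match tail with
   | [] => []
   | month :: _ =>                 -- second pop(0)
    let n : Nat := if month = 2 then 28
                   else if month = 4 ∨ month = 6 ∨ month = 9 ∨ month = 11 then 30 else 31
    let days := start :: buildDays n start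
    let fullDay : Int := ((days.take n).countP (fun d => d == 1 || d == 2 || d == 3) : Nat)
    let halfDay : Int := ((days.take n).countP (fun d => d == 4 || d == 5) : Nat)
    let nextMonth : Int := if month < 12 then month + 1 else 1
    -- f"{nextMonth:02d}": zero-pad to width 2 (only nonnegative single digits are ever shorter than 2)
    let t := PySem.Int.toChars nextMonth
    let nm2 := List.replicate (2 - t.length) '0' ++ t
    -- days[n] is always in range: days has length n+1
    let nd := PySem.Int.toChars (days.getD n 0) ++ nm2
    (PySem.Int.ofChars? nd).elim [] (fun v => [fullDay, halfDay, v])   -- int(...): none = ValueError (outside Pre_)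

-- ===== PRECONDITION & SPEC =====
-- A raises IndexError (pop from an empty list) with fewer than two elements, and ValueError on
-- int("...-k...") when the month is ≤ -2 (negative nextMonth inside the padded string); Pre_ excludes
-- exactly those crashes (Source B raises on the very same inputs).
def Pre_dayMonthEncoder (daymonth : List Int) : Prop :=
  2 ≤ daymonth.length ∧ -1 ≤ daymonth.getD 1 0
instance (daymonth : List Int) : Decidable (Pre_dayMonthEncoder daymonth) := by
  unfold Pre_dayMonthEncoder; infer_instance

def pvWitness_dayMonthEncoder : List Int := [3, 5]

def Spec_dayMonthEncoder (daymonth : List Int) (out : List Int) : Prop := out = dayMonthEncoder_alt daymonth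
instance (daymonth : List Int) (out : List Int) : Decidable (Spec_dayMonthEncoder daymonth out) := by unfold Spec_dayMonthEncoder; infer_instance

-- ===== CLAIM =====
def Claim_equal_dayMonthEncoder : Prop := ∀ (daymonth : List Int), Dom_dayMonthEncoder daymonth → Pre_dayMonthEncoder daymonth → Spec_dayMonthEncoder daymonth (dayMonthEncoder daymonth)

-- ===== LEMMAS AND PROOFS =====

-- A's loop = (last weekday of B's sequence, counts over the first n weekdays of B's sequence)
lemma loopA_count (n : Nat) : ∀ (s f h : Int),
    loopA n s f h =
      ((s :: buildDays n s).getD n 0,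
       f + (((s :: buildDays n s).take n).countP (fun d => d == 1 || d == 2 || d == 3) : Int),
       h + (((s :: buildDays n s).take n).countP (fun d => d == 4 || d == 5) : Int)) := by
  induction n with
  | zero => intro s f h; simp [loopA, buildDays]
  | succ n ih =>
    intro s f h
    have hstep : (if s + 1 > 7 then (1 : Int) else s + 1) = (if s < 7 then s + 1 else 1) := by
      split_ifs <;> omega
    have hb : buildDays (n + 1) s = (if s < 7 then s + 1 else 1) :: buildDays n (if s < 7 then s + 1 else 1) := by
      simp [buildDays]
    by_cases h1 : s = 1 ∨ s = 2 ∨ s = 3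
    · have hp1 : (s == 1 || s == 2 || s == 3) = true := by
        rcases h1 with rfl | rfl | rfl <;> decide
      have hp2 : (s == 4 || s == 5) = false := by
        rcases h1 with rfl | rfl | rfl <;> decide
      simp only [loopA, if_pos h1, hstep, ih, hb, List.getD_cons_succ,
        List.take_succ_cons, List.countP_cons, hp1, hp2]
      refine Prod.ext rfl (Prod.ext ?_ ?_) <;> push_cast <;> ring
    · by_cases h2 : s = 4 ∨ s = 5
      · have hp1 : (s == 1 || s == 2 || s == 3) = false := by
          rcases h2 with rfl | rfl <;> decide
        have hp2 : (s == 4 || s == 5) = true := by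
          rcases h2 with rfl | rfl <;> decide
        simp only [loopA, if_neg h1, if_pos h2, hstep, ih, hb, List.getD_cons_succ,
          List.take_succ_cons, List.countP_cons, hp1, hp2]
        refine Prod.ext rfl (Prod.ext ?_ ?_) <;> push_cast <;> ring
      · have hp1 : (s == 1 || s == 2 || s == 3) = false := by
          simp only [Bool.or_eq_false_iff, beq_eq_false_iff_ne]
          tauto
        have hp2 : (s == 4 || s == 5) = false := by
          simp only [Bool.or_eq_false_iff, beq_eq_false_iff_ne]
          tauto
        simp only [loopA, if_neg h1, if_neg h2, hstep, ih, hb, List.getD_cons_succ,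
          List.take_succ_cons, List.countP_cons, hp1, hp2]
        refine Prod.ext rfl (Prod.ext ?_ ?_) <;> push_cast <;> ring

-- the two next-month computations coincide
lemma nextMonth_eq (m : Int) :
    (if m + 1 > 12 then (1 : Int) else m + 1) = (if m < 12 then m + 1 else 1) := by
  split_ifs <;> omega

-- for 0 ≤ nm ≤ 12 A's "0"-prefix branch is exactly f"{nm:02d}"
lemma pad_eq (nm : Int) (h0 : 0 ≤ nm) (h12 : nm ≤ 12) :
    (if nm > 9 then PySem.Int.toChars nm else '0' :: PySem.Int.toChars nm) =
      List.replicate (2 - (PySem.Int.toChars nm).length) '0' ++ PySem.Int.toChars nm := by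
  interval_cases nm <;> decide

-- the shared core, after the branch fixing n as a literal
lemma core_eq (s m : Int) (n : Nat) (hm : -1 ≤ m)
    (hA : (if m ∈ ([2] : List Int) then (28 : Nat) else if m ∈ ([4, 6, 9, 11] : List Int) then 30 else 31) = n)
    (hB : (if m = 2 then (28 : Nat) else if m = 4 ∨ m = 6 ∨ m = 9 ∨ m = 11 then 30 else 31) = n) :
    dayMonthEncoder (s :: m :: []) = dayMonthEncoder_alt (s :: m :: []) := by
  simp only [dayMonthEncoder, dayMonthEncoder_alt, hA, hB, loopA_count, zero_add, nextMonth_eq]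
  have hnm0 : 0 ≤ (if m < 12 then m + 1 else 1) := by split_ifs <;> omega
  have hnm12 : (if m < 12 then m + 1 else 1) ≤ 12 := by split_ifs <;> omega
  have hpad := pad_eq _ hnm0 hnm12
  rw [← apply_ite (fun l => PySem.Int.toChars (((s :: buildDays n s).getD n 0)) ++ l)] at *
  rw [hpad]
  cases hX : PySem.Int.ofChars?
      (PySem.Int.toChars ((s :: buildDays n s).getD n 0) ++
        (List.replicate (2 - (PySem.Int.toChars (if m < 12 then m + 1 else 1)).length) '0' ++
          PySem.Int.toChars (if m < 12 then m + 1 else 1))) <;>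
    simp

-- both ports only look at the first two elements
lemma portA_tail (s m : Int) (r : List Int) : dayMonthEncoder (s :: m :: r) = dayMonthEncoder [s, m] := rfl
lemma portB_tail (s m : Int) (r : List Int) : dayMonthEncoder_alt (s :: m :: r) = dayMonthEncoder_alt [s, m] := rfl

-- ===== VERDICT =====
theorem dayMonthEncoder_spec : Claim_equal_dayMonthEncoder := by
  intro daymonth _ hpre
  unfold Spec_dayMonthEncoder
  match daymonth with
  | [] => simp [Pre_dayMonthEncoder] at hpre
  | [_] => simp [Pre_dayMonthEncoder] at hpre
  | s :: m :: rest =>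
    obtain ⟨-, hm⟩ := hpre
    simp only [List.getD_cons_succ, List.getD_cons_zero] at hm
    rw [portA_tail, portB_tail]
    by_cases h2 : m = 2
    · exact core_eq s m 28 hm (by simp [h2]) (by simp [h2])
    · by_cases h30 : m = 4 ∨ m = 6 ∨ m = 9 ∨ m = 11
      · refine core_eq s m 30 hm ?_ ?_
        · have : (m ∈ ([2] : List Int)) = False := by simp [h2]
          have h4 : (m ∈ ([4, 6, 9, 11] : List Int)) = True := by
            simp only [List.mem_cons, eq_iff_iff, iff_true]; tauto
          simp [this, h4]
        · simp [h2, h30]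
      · refine core_eq s m 31 hm ?_ ?_
        · have : (m ∈ ([2] : List Int)) = False := by simp [h2]
          have h4 : (m ∈ ([4, 6, 9, 11] : List Int)) = False := by
            simp only [List.mem_cons, eq_iff_iff, iff_false]; tauto
          simp [this, h4]
        · simp [h2, h30]
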